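-- pv_equiv track=rewrite | github.com/Tushaar28/CodeForces | 1095A.py | func
-- ===== SOURCE A (Python) =====
-- def func(st):
--     k = 1
--     i = 0
--     res = ""
--     while(i < len(st)):
--         res += st[i]
--         k += 1
--         i += k
--     return res
-- ===== SOURCE B (Python) =====
-- def func(st):
--     # Recursive decomposition: the kept characters are the first character of the
--     # remaining string, then the result of the same process on the string with the
--     # next `step` characters sliced off (step = 2, 3, 4, ...). No index arithmetic.
--     def rec(s, step):
--         if not s:
--             return ""
--         return s[0] + rec(s[step:], step + 1)
--     return rec(st, 2)
-- ===== Notes on version B (the rewrite author's own statement) =====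
-- stated objective: alternative
-- what changed: B is a recursion that consumes the string by slicing: it keeps the head of the remaining string and recurses on s[step:] with step+1, instead of A's iterative while loop over absolute indices with a running accumulator i += k.
import Mathlib
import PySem

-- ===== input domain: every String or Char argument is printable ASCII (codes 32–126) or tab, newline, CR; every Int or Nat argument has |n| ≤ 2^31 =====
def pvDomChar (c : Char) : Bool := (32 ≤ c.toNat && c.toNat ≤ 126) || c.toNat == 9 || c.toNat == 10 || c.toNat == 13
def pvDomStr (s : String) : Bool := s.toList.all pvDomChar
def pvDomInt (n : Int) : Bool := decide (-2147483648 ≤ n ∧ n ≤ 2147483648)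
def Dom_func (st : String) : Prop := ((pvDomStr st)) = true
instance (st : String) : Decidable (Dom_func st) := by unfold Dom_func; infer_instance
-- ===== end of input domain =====

-- B replaces A's iterative while loop over absolute indices (i += k) by a recursion
-- that consumes the string by slicing (keep head, recurse on s[step:] with step+1);
-- same result, alternative decomposition (not claimed faster).

-- ===== PORT A =====
-- A's while loop: res += st[i]; k += 1; i += k, while i < len(st).
def funcGo (s : List Char) (k i : Nat) (res : List Char) : List Char :=
  if h : i < s.length then
    funcGo s (k + 1) (i + (k + 1)) (res ++ [s[i]])
  else res
termination_by s.length - i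
decreasing_by omega

def func (st : String) : String := String.mk (funcGo st.toList 1 0 [])

-- ===== PORT B =====
-- B's rec(s, step): if not s: return ""; return s[0] + rec(s[step:], step + 1).
-- On the nonempty list c :: rest the slice s[step:] (step ≥ 1 always here) is
-- rest.drop (step - 1); written this way the recursion is structurally decreasing.
def funcAltRec (s : List Char) (step : Nat) : List Char :=
  match s with
  | [] => []
  | c :: rest => c :: funcAltRec (rest.drop (step - 1)) (step + 1)
termination_by s.length
decreasing_by
  simp only [List.length_cons, List.length_drop]
  omega

def func_alt (st : String) : String := String.mk (funcAltRec st.toList 2)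

-- ===== PRECONDITION & SPEC =====
def Spec_func (st : String) (out : String) : Prop := out = func_alt st
instance (st : String) (out : String) : Decidable (Spec_func st out) := by unfold Spec_func; infer_instance

-- ===== CLAIM (what is proved, stated in full; the proofs are below) =====
def Claim_equal_func : Prop := ∀ (st : String), Dom_func st → Spec_func st (func st)

-- ===== LEMMAS AND PROOFS =====

-- Invariant linking the two loops: with the suffix s.drop i still to process and
-- step = k + 1, A's loop from state (k, i, res) produces res ++ B's recursion.
theorem pv_go_eq (s : List Char) (n k i : Nat) (res : List Char)
    (hn : s.length - i ≤ n) :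
    funcGo s k i res = res ++ funcAltRec (s.drop i) (k + 1) := by
  induction n generalizing k i res with
  | zero =>
      have hi : ¬ i < s.length := by omega
      rw [funcGo, funcAltRec.eq_def]
      simp [hi, List.drop_eq_nil_of_le (by omega : s.length ≤ i)]
  | succ m ih =>
      rw [funcGo]
      by_cases h : i < s.length
      · simp only [h, dif_pos]
        have hdrop : s.drop i = s[i] :: s.drop (i + 1) :=
          List.drop_eq_getElem_cons h
        rw [ih (k + 1) (i + (k + 1)) (res ++ [s[i]]) (by omega)]
        rw [hdrop, funcAltRec]
        simp only [Nat.add_sub_cancel, List.drop_drop]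
        rw [List.append_assoc]
        norm_num
        congr 2
        omega
      · simp [h, List.drop_eq_nil_of_le (by omega : s.length ≤ i), funcAltRec]

-- ===== VERDICT (by name: the statement is the Claim_ definition above) =====
theorem func_spec : Claim_equal_func := by
  intro st _
  unfold Spec_func func func_alt
  rw [pv_go_eq st.toList st.toList.length 1 0 [] (by omega)]
  simp
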